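-- pv_equiv track=rewrite | github.com/Glibusss/Progmatic_Test | testTask.py | mathExpression
-- ===== SOURCE A (Python) =====
-- def ternary(num):
--     base = 3
--     res = ''
--     while num > 0:
--         res = str(num % base) + res
--         num //= base
--     return res
--
-- def mathExpression(k):
--     ter = ternary(k)
--     terList = list(ter)
--     mark = [''] * 9
--     for i in range(1, 10):
--         t = i - 1
--         i *= (-1)
--         if t < len(terList):
--             element = int(terList[i])
--             if element == 0:
--                 mark[i] = ''
--             elif element == 1:
--                 mark[i] = '+'
--             elif element == 2:
--                 mark[i] = '-'
--         else:
--             mark[i] = ''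
--     expression = ''
--     for i in range(9):
--         expression += f'{9-i}{mark[i]}'
--     expression += '0'
--     return expression
-- ===== SOURCE B (Python) =====
-- def mathExpression(k):
--     m = k % 3**9 if k > 0 else 0
--     p = 3**8
--     parts = []
--     for n in range(9, 0, -1):
--         d, m = divmod(m, p)
--         p //= 3
--         parts.append(str(n) + ('', '+', '-')[d])
--     return ''.join(parts) + '0'
-- ===== Notes on version B (the rewrite author's own statement) =====
-- stated objective: simpler
-- what changed: B works most-significant-digit-first: a single modulo by the ninth power of three collapses the high digits A discards via negative indexing, then one divmod-by-descending-powers loop yields each sign while the expression is appended directly in output order, eliminating A's ternary-string helper, preallocated mark array and separate negative-index and assembly passes.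
import Mathlib
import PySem

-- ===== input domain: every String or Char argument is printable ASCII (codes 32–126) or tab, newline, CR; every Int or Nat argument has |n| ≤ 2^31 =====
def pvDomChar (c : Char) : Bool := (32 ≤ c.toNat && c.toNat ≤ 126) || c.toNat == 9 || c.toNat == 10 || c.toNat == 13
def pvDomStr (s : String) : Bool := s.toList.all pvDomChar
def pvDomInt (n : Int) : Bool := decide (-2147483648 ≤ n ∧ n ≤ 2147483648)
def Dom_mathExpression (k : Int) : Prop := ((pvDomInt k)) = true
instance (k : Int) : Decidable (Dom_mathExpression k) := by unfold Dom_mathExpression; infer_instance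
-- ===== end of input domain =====

-- B replaces A's LSB-first ternary-string conversion, 9-slot mark array and negative-index
-- pass by ONE most-significant-first pass: a single `k % 3**9` collapses the unused high
-- digits, then divmod by descending powers of 3 yields each sign while the expression is
-- assembled directly in output order; objective: simpler.

-- ===== PORT A =====

def ternary (num : Int) : String :=
  if num > 0 then
    ternary (PySem.Int.floordiv num 3) ++ PySem.Int.toStr (PySem.Int.mod num 3)
  else ""
termination_by num.toNat
decreasing_by rw [PySem.Int.floordiv_eq_ediv_of_pos (by omega)]; omega

def mathExpression (k : Int) : String :=
  let ter := ternary k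
  let terList := ter.toList
  let mark : List String := List.replicate 9 ""
  let mark := (PySem.List.pyRange 1 10 1).foldl (fun (mark : List String) i =>
    let t := i - 1
    let i := i * (-1)
    if t < (terList.length : Int) then
      -- int(terList[i]) on a decimal-digit char is exactly its code point minus 48;
      -- the index is always in range here (guarded by t < len), so pyGetD is exact
      let element : Int := ((PySem.List.pyGetD terList i ' ').toNat : Int) - 48
      if element = 0 then PySem.List.pySetD mark i ""
      else if element = 1 then PySem.List.pySetD mark i "+"
      else if element = 2 then PySem.List.pySetD mark i "-"
      else mark
    else PySem.List.pySetD mark i "") mark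
  let expression := (PySem.List.pyRange 0 9 1).foldl (fun (expression : String) i =>
    expression ++ PySem.Int.toStr (9 - i) ++ PySem.List.pyGetD mark i "") ""
  expression ++ "0"


-- ===== PORT B =====
def mathExpression_alt (k : Int) : String :=
  let m0 : Int := if k > 0 then PySem.Int.mod k 19683 else 0
  let st := (PySem.List.pyRange 9 0 (-1)).foldl
    (fun (st : List String × Int × Int) n =>
      -- d, m = divmod(m, p): p > 0 throughout, so floordiv/mod are that pair exactly
      let d := PySem.Int.floordiv st.2.1 st.2.2
      let m := PySem.Int.mod st.2.1 st.2.2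
      let p := PySem.Int.floordiv st.2.2 3
      (st.1 ++ [PySem.Int.toStr n ++ PySem.List.pyGetD ["", "+", "-"] d ""], m, p))
    ([], m0, 6561)
  PySem.Str.join "" st.1 ++ "0"


-- ===== PRECONDITION & SPEC =====
def Spec_mathExpression (k : Int) (out : String) : Prop := out = mathExpression_alt k
instance (k : Int) (out : String) : Decidable (Spec_mathExpression k out) := by unfold Spec_mathExpression; infer_instance

-- ===== CLAIM (what is proved, stated in full; the proofs are below) =====
def Claim_equal_mathExpression : Prop := ∀ (k : Int), Dom_mathExpression k → Spec_mathExpression k (mathExpression k)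

-- ===== LEMMAS AND PROOFS =====
def pvIter : Nat → Int → Int
  | 0, k => k
  | j+1, k => if k > 0 then pvIter j (PySem.Int.floordiv k 3) else k

def pvLsb (k : Int) : List Int :=
  if k > 0 then PySem.Int.mod k 3 :: pvLsb (PySem.Int.floordiv k 3) else []
termination_by k.toNat
decreasing_by rw [PySem.Int.floordiv_eq_ediv_of_pos (by omega)]; omega

def pvDC (d : Int) : Char := Char.ofNat (48 + d.toNat)

-- B-side abstract digit value: sign for ternary digit j of a (a ≥ 0)
def pvBsig (a : Int) (j : Nat) : String :=
  PySem.List.pyGetD ["", "+", "-"] (a / 3 ^ j % 3) ""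

theorem pvToStr_digit (d : Int) (h0 : d = 0 ∨ d = 1 ∨ d = 2) :
    (PySem.Int.toStr d).toList = [pvDC d] := by
  rcases h0 with h | h | h <;> subst h <;> decide

theorem pvTernary_toList (k : Int) : (ternary k).toList = ((pvLsb k).map pvDC).reverse := by
  rw [ternary, pvLsb]
  split_ifs with h
  · have ih := pvTernary_toList (PySem.Int.floordiv k 3)
    have ht := pvToStr_digit (PySem.Int.mod k 3)
      (by rw [PySem.Int.mod_eq_emod_of_pos (by omega)]; omega)
    rw [String.toList_append, ih, ht]
    simp
  · rfl
termination_by k.toNat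
decreasing_by rw [PySem.Int.floordiv_eq_ediv_of_pos (by omega)]; omega

theorem pvIter_nonpos (j : Nat) (k : Int) (h : k ≤ 0) : pvIter j k = k := by
  induction j with
  | zero => rfl
  | succ j _ => simp only [pvIter, if_neg (by omega : ¬ k > 0)]

theorem pvIter_succ (j : Nat) (k : Int) (h : k > 0) :
    pvIter (j+1) k = pvIter j (PySem.Int.floordiv k 3) := by
  simp only [pvIter, if_pos h]

theorem pvLsb_getD (j : Nat) (k : Int) :
    (pvLsb k).getD j 0 = if pvIter j k > 0 then PySem.Int.mod (pvIter j k) 3 else 0 := by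
  induction j generalizing k with
  | zero =>
    rw [pvLsb]; by_cases h : k > 0 <;> simp [pvIter, h]
  | succ j ih =>
    rw [pvLsb]; by_cases h : k > 0
    · rw [if_pos h, pvIter_succ j k h, List.getD_cons_succ]; exact ih _
    · rw [if_neg h, pvIter_nonpos _ _ (by omega), if_neg h]; simp

theorem pvLsb_len (j : Nat) (k : Int) : j < (pvLsb k).length ↔ pvIter j k > 0 := by
  induction j generalizing k with
  | zero =>
    rw [pvLsb]; by_cases h : k > 0 <;> simp [pvIter, h]
  | succ j ih =>
    rw [pvLsb]; by_cases h : k > 0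
    · rw [if_pos h, pvIter_succ j k h, List.length_cons]
      simpa using ih (PySem.Int.floordiv k 3)
    · rw [if_neg h, pvIter_nonpos _ _ (by omega)]; simp; omega

def pvAval (T : List Char) (i : Int) : String :=
  if i - 1 < (T.length : Int) then
    (if ((PySem.List.pyGetD T (i * (-1)) ' ').toNat : Int) - 48 = 0 then ""
     else if ((PySem.List.pyGetD T (i * (-1)) ' ').toNat : Int) - 48 = 1 then "+"
     else if ((PySem.List.pyGetD T (i * (-1)) ' ').toNat : Int) - 48 = 2 then "-"
     else "")
  else ""

def pvBval (k : Int) (j : Nat) : String :=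
  if pvIter j k > 0 then PySem.List.pyGetD ["", "+", "-"] (PySem.Int.mod (pvIter j k) 3) "" else ""

theorem pvComp (k : Int) (j : Nat) :
    pvAval (ternary k).toList ((j : Int) + 1) = pvBval k j := by
  rw [pvAval, pvBval, pvTernary_toList]
  by_cases hp : pvIter j k > 0
  · have hlen : j < (pvLsb k).length := (pvLsb_len j k).mpr hp
    have hgd := pvLsb_getD j k
    rw [if_pos hp] at hgd
    set l := pvLsb k with hl
    have hcond : ((j : Int) + 1 - 1) < (((l.map pvDC).reverse.length : Nat) : Int) := by
      simp; omega
    rw [if_pos hcond]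
    have hidx : ((j : Int) + 1) * (-1) = -(((j + 1 : Nat) : Int)) := by push_cast; ring
    rw [hidx, PySem.List.pyGetD_neg_natCast _ _ _ (by omega) (by simp; omega)]
    have hlenr : ((l.map pvDC).reverse).length = l.length := by simp
    have hget : ((l.map pvDC).reverse)[(l.map pvDC).reverse.length - (j + 1)] = pvDC l[j] := by
      rw [List.getElem_reverse]
      rw [List.getElem_map]
      apply congrArg pvDC
      apply getElem_congr rfl
      simp only [List.length_map, List.length_reverse]
      omega
    rw [hget]
    have hlj : l[j] = PySem.Int.mod (pvIter j k) 3 := by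
      rw [← hgd]; exact (List.getD_eq_getElem l 0 hlen).symm
    have hm : PySem.Int.mod (pvIter j k) 3 = 0 ∨ PySem.Int.mod (pvIter j k) 3 = 1 ∨
        PySem.Int.mod (pvIter j k) 3 = 2 := by
      rw [PySem.Int.mod_eq_emod_of_pos (by omega)]; omega
    rw [if_pos hp, hlj]
    rcases hm with hm | hm | hm <;> rw [hm] <;> decide
  · have hlen : ¬ j < (pvLsb k).length := fun hc => hp ((pvLsb_len j k).mp hc)
    rw [if_neg hp, if_neg (by simp; omega)]

-- pvIter is iterated floor division: j steps of //3 on a nonnegative k is division by 3^j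
theorem pvIter_eq (j : Nat) (k : Int) (hk : 0 ≤ k) : pvIter j k = k / 3 ^ j := by
  induction j generalizing k with
  | zero => simp [pvIter]
  | succ j ih =>
    by_cases h : k > 0
    · rw [pvIter_succ j k h, PySem.Int.floordiv_eq_ediv_of_pos (by omega), ih _ (by positivity)]
      rw [Int.ediv_ediv_of_nonneg (by omega)]
      ring_nf
    · have hk0 : k = 0 := by omega
      rw [pvIter_nonpos _ _ (by omega), hk0, Int.zero_ediv]

-- A's digit-j sign equals B's digit value (with negative/zero k collapsed to 0)
theorem pvBvalBridge (k : Int) (j : Nat) :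
    pvBval k j = pvBsig (if k > 0 then k else 0) j := by
  rw [pvBval, pvBsig]
  by_cases h : k > 0
  · rw [if_pos h, pvIter_eq j k (by omega), PySem.Int.mod_eq_emod_of_pos (by omega : (0:Int) < 3)]
    by_cases hd : k / 3 ^ j > 0
    · rw [if_pos hd]
    · have : k / 3 ^ j = 0 := by
        have : 0 ≤ k / 3 ^ j := Int.ediv_nonneg (by omega) (by positivity)
        omega
      rw [if_neg hd, this]
      decide
  · rw [if_neg h, pvIter_nonpos _ _ (by omega), if_neg h, Int.zero_ediv]
    decide

-- MSB digit exchange: (a % 3^(n+1)) / 3^n = (a / 3^n) % 3 for a ≥ 0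
theorem pvDigit (a : Int) (ha : 0 ≤ a) (n : Nat) : a % 3 ^ (n+1) / 3 ^ n = a / 3 ^ n % 3 := by
  lift a to ℕ using ha
  rw [show ((3:ℤ) ^ (n+1)) = ((3 ^ (n+1) : ℕ) : ℤ) by push_cast; ring,
      show ((3:ℤ) ^ n) = ((3 ^ n : ℕ) : ℤ) by push_cast; ring,
      show ((3:ℤ)) = ((3:ℕ) : ℤ) from rfl]
  norm_cast
  rw [pow_succ']
  -- Nat: a % (3 * 3^n) / 3^n = a / 3^n % 3
  rw [mul_comm]
  exact Nat.mod_mul_right_div_self a (3 ^ n) 3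

-- B's loop invariant: starting from (out, a % 3^n, 3^n // 3), the countdown n..1 appends
-- exactly the signs of digits n-1 .. 0 of a
theorem pvFoldBGen (a : Int) (ha : 0 ≤ a) (n : Nat) (out : List String) :
    (PySem.List.pyRange (n : Int) 0 (-1)).foldl
      (fun (st : List String × Int × Int) i =>
        let d := PySem.Int.floordiv st.2.1 st.2.2
        let m := PySem.Int.mod st.2.1 st.2.2
        let p := PySem.Int.floordiv st.2.2 3
        (st.1 ++ [PySem.Int.toStr i ++ PySem.List.pyGetD ["", "+", "-"] d ""], m, p))
      (out, a % 3 ^ n, 3 ^ n / 3)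
    = (out ++ (List.range n).reverse.map
        (fun (j : Nat) => PySem.Int.toStr ((j : Int) + 1) ++ pvBsig a j), 0, 0) := by
  induction n generalizing out with
  | zero =>
    rw [PySem.List.pyRange_neg_one_eq_nil (by norm_num), List.foldl_nil]
    norm_num [Int.emod_one]
  | succ n ih =>
    have hppos : (0:Int) < 3 ^ n := by positivity
    have hp : (3:Int) ^ (n+1) / 3 = 3 ^ n := by
      rw [pow_succ]; exact Int.mul_ediv_cancel _ (by norm_num)
    rw [PySem.List.pyRange_neg_one_cons (by push_cast; omega), List.foldl_cons,
      show ((n+1 : Nat) : Int) - 1 = (n : Int) by push_cast; ring]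
    dsimp only at ih ⊢
    rw [hp, PySem.Int.floordiv_eq_ediv_of_pos hppos, PySem.Int.mod_eq_emod_of_pos hppos,
      PySem.Int.floordiv_eq_ediv_of_pos (show (0:Int) < 3 by norm_num),
      pvDigit a ha n, Int.emod_emod_of_dvd _ (pow_dvd_pow 3 (Nat.le_succ n)), ih]
    rw [List.range_succ, List.reverse_append, List.map_append]
    simp [pvBsig]

theorem pvSetD_neg (xs : List String) (j : Nat) (hj : 0 < j) (hj2 : j ≤ xs.length) (v : String) :
    PySem.List.pySetD xs (-(j : Int)) v = xs.set (xs.length - j) v := by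
  unfold PySem.List.pySetD PySem.List.pySet? PySem.List.pyIdx?
  split_ifs <;> simp_all

def pvStep (T : List Char) (mark : List String) (i : Int) : List String :=
  if i - 1 < (T.length : Int) then
    (if ((PySem.List.pyGetD T (i * (-1)) ' ').toNat : Int) - 48 = 0 then
       PySem.List.pySetD mark (i * (-1)) ""
     else if ((PySem.List.pyGetD T (i * (-1)) ' ').toNat : Int) - 48 = 1 then
       PySem.List.pySetD mark (i * (-1)) "+"
     else if ((PySem.List.pyGetD T (i * (-1)) ' ').toNat : Int) - 48 = 2 then
       PySem.List.pySetD mark (i * (-1)) "-"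
     else mark)
  else PySem.List.pySetD mark (i * (-1)) ""

theorem pvStep_char (T : List Char) (M : List String) (hM : M.length = 9) (n : Nat) (hn : n ≤ 8)
    (hfree : M.getD n "" = "") :
    pvStep T M (((9 - n : Nat) : Int)) = M.set n (pvAval T (((9 - n : Nat) : Int))) := by
  have hset : ∀ v, PySem.List.pySetD M ((((9 - n : Nat) : Int)) * (-1)) v = M.set n v := by
    intro v
    have h1 : (((9 - n : Nat) : Int)) * (-1) = -(((9 - n : Nat) : Int)) := by ring
    rw [h1, pvSetD_neg M (9 - n) (by omega) (by omega) v]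
    congr 1
    omega
  rw [pvStep, pvAval]
  split_ifs
  case _ => rw [hset]
  case _ => rw [hset]
  case _ => rw [hset]
  case _ =>
    have hn9 : n < M.length := by omega
    rw [List.getD_eq_getElem _ _ hn9] at hfree
    rw [← hfree]
    exact (List.set_getElem_self hn9).symm
  case _ => rw [hset]

theorem pvStep_getD_ne (T : List Char) (M : List String) (hM : M.length = 9) (n p : Nat)
    (hn : n ≤ 8) (hp : p ≠ n) (hfree : M.getD n "" = "") :
    (pvStep T M (((9 - n : Nat) : Int))).getD p "" = M.getD p "" := by
  rw [pvStep_char T M hM n hn hfree]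
  rcases Nat.lt_or_ge p M.length with h | h
  · rw [List.getD_eq_getElem _ _ (by simpa using h), List.getD_eq_getElem _ _ h,
      List.getElem_set_ne (by omega)]
  · rw [List.getD_eq_default _ _ (by simpa using h), List.getD_eq_default _ _ h]

theorem pvStep_getD_self (T : List Char) (M : List String) (hM : M.length = 9) (n : Nat)
    (hn : n ≤ 8) (hfree : M.getD n "" = "") :
    (pvStep T M (((9 - n : Nat) : Int))).getD n "" = pvAval T (((9 - n : Nat) : Int)) := by
  rw [pvStep_char T M hM n hn hfree,
    List.getD_eq_getElem _ _ (by simp [hM]; omega), List.getElem_set_self]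

theorem pvMarkAux (T : List Char) (n : Nat) (hn : n ≤ 9) (M : List String) (hM : M.length = 9)
    (hfall : ∀ p, p < n → M.getD p "" = "") :
    (PySem.List.pyRange ((10 - n : Nat) : Int) 10 1).foldl (pvStep T) M
    = (List.range 9).map (fun p => if p < n then pvAval T ((9 - p : Nat) : Int) else M.getD p "") := by
  induction n generalizing M with
  | zero =>
    rw [PySem.List.pyRange_one_eq_nil (by norm_num), List.foldl_nil]
    apply List.ext_getElem (by simp [hM])
    intro p h1 h2
    simp only [List.getElem_map, List.getElem_range]
    rw [if_neg (by omega), List.getD_eq_getElem _ _ (by omega)]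
  | succ n ih =>
    have hn8 : n ≤ 8 := by omega
    have hhead : ((10 - (n+1) : Nat) : Int) = ((9 - n : Nat) : Int) := by
      congr 1; omega
    have htail : ((9 - n : Nat) : Int) + 1 = ((10 - n : Nat) : Int) := by
      omega
    rw [hhead, PySem.List.pyRange_one_cons (by omega : ((9 - n : Nat) : Int) < 10),
      htail, List.foldl_cons]
    have hfree : M.getD n "" = "" := hfall n (by omega)
    have hM' : (pvStep T M ((9 - n : Nat) : Int)).length = 9 := by
      rw [pvStep_char T M hM n hn8 hfree]; simp [hM]
    have hfall' : ∀ p, p < n → (pvStep T M ((9 - n : Nat) : Int)).getD p "" = "" := by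
      intro p hp
      rw [pvStep_getD_ne T M hM n p hn8 (by omega) hfree]
      exact hfall p (by omega)
    rw [ih (by omega) _ hM' hfall']
    apply List.map_congr_left
    intro p hp
    rw [List.mem_range] at hp
    rcases Nat.lt_trichotomy p n with h | h | h
    · rw [if_pos h, if_pos (by omega)]
    · subst h
      rw [if_neg (by omega), if_pos (by omega), pvStep_getD_self T M hM p hn8 hfree]
    · rw [if_neg (by omega), if_neg (by omega),
        pvStep_getD_ne T M hM n p hn8 (by omega) hfree]

theorem pvFoldStr2 (l : List Int) (f g : Int → String) (e : String) :
    (l.foldl (fun acc i => acc ++ f i ++ g i) e).toList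
      = e.toList ++ (l.map (fun i => (f i).toList ++ (g i).toList)).flatten := by
  induction l generalizing e with
  | nil => simp
  | cons h t ih => simp [ih]

theorem pvJoinChars (l : List (List Char)) : PySem.Chars.join [] l = l.flatten := by
  induction l with
  | nil => rfl
  | cons h t ih =>
    cases t <;> simp_all [PySem.Chars.join, List.intercalate, List.intersperse]

theorem pvJoin (l : List String) : (PySem.Str.join "" l).toList = (l.map String.toList).flatten := by
  have := pvJoinChars (l.map String.toList)
  simpa [PySem.Str.join] using this

theorem pvMain (k : Int) : mathExpression k = mathExpression_alt k := by
  apply String.toList_inj.mp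
  have hA : mathExpression k =
      (PySem.List.pyRange 0 9 1).foldl
        (fun (expression : String) i =>
          expression ++ PySem.Int.toStr (9 - i) ++
            PySem.List.pyGetD
              ((PySem.List.pyRange 1 10 1).foldl (pvStep (ternary k).toList)
                (List.replicate 9 "")) i "") "" ++ "0" := rfl
  have hB0 : mathExpression_alt k =
      PySem.Str.join ""
        (((PySem.List.pyRange 9 0 (-1)).foldl
          (fun (st : List String × Int × Int) i =>
            let d := PySem.Int.floordiv st.2.1 st.2.2
            let m := PySem.Int.mod st.2.1 st.2.2
            let p := PySem.Int.floordiv st.2.2 3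
            (st.1 ++ [PySem.Int.toStr i ++ PySem.List.pyGetD ["", "+", "-"] d ""], m, p))
          ([], (if k > 0 then PySem.Int.mod k 19683 else 0), 6561)).1) ++ "0" := rfl
  set a := if k > 0 then k else 0 with ha_def
  have ha : (0:Int) ≤ a := by rw [ha_def]; split <;> omega
  have hm0 : (if k > 0 then PySem.Int.mod k 19683 else 0) = a % 19683 := by
    rw [ha_def]
    by_cases h : k > 0
    · rw [if_pos h, if_pos h, PySem.Int.mod_eq_emod_of_pos (by norm_num)]
    · rw [if_neg h, if_neg h]; rfl
  have h9 := pvFoldBGen a ha 9 []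
  rw [show ((9 : Nat) : Int) = (9 : Int) from rfl,
      show ((3:Int) ^ (9:Nat)) = 19683 from by norm_num,
      show (19683 : Int) / 3 = 6561 from by norm_num] at h9
  have hB : mathExpression_alt k =
      PySem.Str.join ""
        ((List.range 9).reverse.map
          (fun (j : Nat) => PySem.Int.toStr ((j : Int) + 1) ++ pvBsig a j)) ++ "0" := by
    rw [hB0, hm0, h9]
    simp
  have hmark := pvMarkAux (ternary k).toList 9 (by omega) (List.replicate 9 "") (by simp)
      (by intro p hp; interval_cases p <;> rfl)
  rw [show ((10 - 9 : Nat) : Int) = (1 : Int) by norm_num] at hmark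
  rw [hA, hB, hmark]
  simp only [String.toList_append]
  rw [pvFoldStr2, pvJoin]
  rw [show PySem.List.pyRange 0 9 1 = [0,1,2,3,4,5,6,7,8] from by decide]
  rw [show (List.range 9).reverse = [8,7,6,5,4,3,2,1,0] from rfl]
  simp only [List.map_cons, List.map_nil]
  have c0 := pvComp k 0; have c1 := pvComp k 1; have c2 := pvComp k 2
  have c3 := pvComp k 3; have c4 := pvComp k 4; have c5 := pvComp k 5
  have c6 := pvComp k 6; have c7 := pvComp k 7; have c8 := pvComp k 8
  have b0 := pvBvalBridge k 0; have b1 := pvBvalBridge k 1; have b2 := pvBvalBridge k 2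
  have b3 := pvBvalBridge k 3; have b4 := pvBvalBridge k 4; have b5 := pvBvalBridge k 5
  have b6 := pvBvalBridge k 6; have b7 := pvBvalBridge k 7; have b8 := pvBvalBridge k 8
  rw [← ha_def] at b0 b1 b2 b3 b4 b5 b6 b7 b8
  norm_num at c0 c1 c2 c3 c4 c5 c6 c7 c8
  norm_num [PySem.List.pyGetD, PySem.List.pyGet?, PySem.List.pyIdx?, String.toList_append,
    c0, c1, c2, c3, c4, c5, c6, c7, c8, b0, b1, b2, b3, b4, b5, b6, b7, b8]

-- ===== VERDICT (by name: the statement is the Claim_ definition above) =====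
theorem mathExpression_spec : Claim_equal_mathExpression := by
  intro k _
  unfold Spec_mathExpression
  exact pvMain k
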